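-- pv_equiv track=rewrite | github.com/wehrwein1/advent-of-code | 2015/03.py | compute_deliveries
-- ===== SOURCE A (Python) =====
-- from typing import Dict, Tuple
-- from collections import defaultdict
--
-- def compute_deliveries(directions : str, is_part1=True) -> Dict[Tuple[int, int], int]:
--   if not is_part1:
--     santa_steps = ''.join([direction for i, direction in enumerate(directions) if i % 2 == 0])
--     robo_steps =  ''.join([direction for i, direction in enumerate(directions) if i % 2 == 1])
--     deliveries = { **compute_deliveries(santa_steps), **compute_deliveries(robo_steps) }
--   else:
--     deliveries : Dict[Tuple[int, int], int] = defaultdict(int)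
--     x, y = 0, 0
--     deliveries[(x,y)] += 1
--     for direction in directions:
--       if direction == '>': x += 1
--       if direction == '^': y += 1
--       if direction == 'v': y -= 1
--       if direction == '<': x -= 1
--       deliveries[(x,y)] += 1
--   return { k : deliveries[k] for k in sorted(deliveries.keys()) }
-- ===== SOURCE B (Python) =====
-- def _counted(directions):
--   # visited positions
--   x, y = 0, 0
--   pos = [(0, 0)]
--   for c in directions:
--     if c == '>': x += 1
--     elif c == '<': x -= 1
--     elif c == '^': y += 1
--     elif c == 'v': y -= 1
--     pos.append((x, y))
--   # sort, then run-length encode: sorted (key, count) pairs without any hashing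
--   pos.sort()
--   out = []
--   i, n = 0, len(pos)
--   while i < n:
--     j = i
--     while j < n and pos[j] == pos[i]:
--       j += 1
--     out.append((pos[i], j - i))
--     i = j
--   return out
--
-- def compute_deliveries(directions, is_part1=True):
--   if is_part1:
--     return dict(_counted(directions))
--   santa = _counted(directions[0::2])
--   robo = _counted(directions[1::2])
--   # two-pointer merge of the two key-sorted run-length lists; robo wins on a shared key
--   out = []
--   i, j = 0, 0
--   while i < len(santa) and j < len(robo):
--     if santa[i][0] < robo[j][0]:
--       out.append(santa[i]); i += 1
--     elif robo[j][0] < santa[i][0]: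
--       out.append(robo[j]); j += 1
--     else:
--       out.append(robo[j]); i += 1; j += 1
--   out.extend(santa[i:])
--   out.extend(robo[j:])
--   return dict(out)
-- ===== Notes on version B (the rewrite author's own statement) =====
-- stated objective: alternative
-- what changed: Counting is done without any dictionary or hashing: B sorts the visited-position list and run-length-encodes adjacent equal positions into already-sorted (key,count) pairs, and part 2 is non-recursive, combining the two halves (taken with slices [0::2]/[1::2]) by a two-pointer merge of the two key-sorted lists with robo winning on shared keys, instead of A's incremental defaultdict updates, recursive calls, dict-splat merge and final key sort.
import Mathlib
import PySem

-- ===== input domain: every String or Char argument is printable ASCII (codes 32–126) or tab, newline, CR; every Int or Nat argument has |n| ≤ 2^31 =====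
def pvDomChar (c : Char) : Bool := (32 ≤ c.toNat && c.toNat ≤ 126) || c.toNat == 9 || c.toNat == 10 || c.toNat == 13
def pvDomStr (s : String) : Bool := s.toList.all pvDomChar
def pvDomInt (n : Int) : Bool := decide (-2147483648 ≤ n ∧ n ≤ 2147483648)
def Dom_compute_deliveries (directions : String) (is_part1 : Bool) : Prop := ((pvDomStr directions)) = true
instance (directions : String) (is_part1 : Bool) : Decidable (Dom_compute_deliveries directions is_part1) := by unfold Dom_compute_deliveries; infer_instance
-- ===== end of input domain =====

-- B counts visits without any dictionary: it sorts the visited-position list and run-length-encodes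
-- it into sorted (key,count) pairs, and combines part 2's two halves by a two-pointer merge
-- (robo wins on shared keys) instead of A's recursive dict-splat merge (objective: alternative).


-- ===== PORT A =====
-- A's final line 'return { k : deliveries[k] for k in sorted(deliveries.keys()) }'
def cdSortedItemsA (d : PySem.Dict (Int × Int) Int) : List (Int × Int × Int) :=
  (PySem.List.sorted2 d.keys (fun k => k.1) (fun k => k.2)).map (fun k => (k.1, k.2, d.getD k 0))

-- A's loop body: the four independent ifs, then 'deliveries[(x,y)] += 1'
def cdStepA (st : PySem.Dict (Int × Int) Int × Int × Int) (c : Char) :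
    PySem.Dict (Int × Int) Int × Int × Int :=
  let x := st.2.1
  let y := st.2.2
  let x := if c = '>' then x + 1 else x
  let y := if c = '^' then y + 1 else y
  let y := if c = 'v' then y - 1 else y
  let x := if c = '<' then x - 1 else x
  (st.1.modify (x, y) 0 (· + 1), x, y)

def compute_deliveries (directions : String) (is_part1 : Bool) : List (Int × Int × Int) :=
  match is_part1 with
  | false =>
    -- ''.join([d for i, d in enumerate(directions) if i % 2 == 0]) (resp. == 1)
    let santa_steps := String.ofList (((PySem.List.enumerate directions.toList 0).filter
        (fun p => PySem.Int.mod p.1 2 == 0)).map (·.2))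
    let robo_steps := String.ofList (((PySem.List.enumerate directions.toList 0).filter
        (fun p => PySem.Int.mod p.1 2 == 1)).map (·.2))
    -- { **compute_deliveries(santa_steps), **compute_deliveries(robo_steps) }
    let deliveries : PySem.Dict (Int × Int) Int :=
      PySem.Dict.ofList ((compute_deliveries santa_steps true ++ compute_deliveries robo_steps true).map
        (fun t => ((t.1, t.2.1), t.2.2)))
    cdSortedItemsA deliveries
  | true =>
    -- deliveries = defaultdict(int); x, y = 0, 0; deliveries[(0,0)] += 1; for direction in directions: …
    let st := directions.toList.foldl cdStepA
      (((PySem.Dict.empty : PySem.Dict (Int × Int) Int).modify (0, 0) 0 (· + 1)), 0, 0)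
    cdSortedItemsA st.1
termination_by (cond is_part1 0 1)
decreasing_by all_goals decide

-- ===== PORT B =====
-- B's position-loop body: the if/elif chain of _counted
def cdMove (p : Int × Int) (c : Char) : Int × Int :=
  if c = '>' then (p.1 + 1, p.2)
  else if c = '<' then (p.1 - 1, p.2)
  else if c = '^' then (p.1, p.2 + 1)
  else if c = 'v' then (p.1, p.2 - 1)
  else p

-- 'x, y = 0, 0; pos = [(0, 0)]; for c in directions: …; pos.append((x, y))'
def cdPositions (cs : List Char) : List (Int × Int) :=
  (cs.foldl (fun st c => (st.1 ++ [cdMove st.2 c], cdMove st.2 c))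
    ([((0:Int), (0:Int))], ((0:Int), (0:Int)))).1

-- the inner 'while j < n and pos[j] == pos[i]' scan: length of the leading run of x, and the rest
def cdRun (x : Int × Int) : List (Int × Int) → Nat × List (Int × Int)
  | [] => (0, [])
  | y :: t => if y = x then ((cdRun x t).1 + 1, (cdRun x t).2) else (0, y :: t)

-- termination helper for cdRle (cited in its decreasing_by)
theorem cdRun_length (x : Int × Int) (t : List (Int × Int)) : (cdRun x t).2.length ≤ t.length := by
  induction t with
  | nil => simp [cdRun]
  | cons y t ih => by_cases h : y = x <;> simp [cdRun, h] <;> omega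

-- the outer 'while i < n' run-length loop of _counted
def cdRle : List (Int × Int) → List ((Int × Int) × Int)
  | [] => []
  | x :: t => (x, ((cdRun x t).1 + 1 : Int)) :: cdRle (cdRun x t).2
termination_by l => l.length
decreasing_by simp; exact cdRun_length x t

-- _counted: the positions, pos.sort() (Python tuple sort), then run-length encode
def cdCounted (s : String) : List ((Int × Int) × Int) :=
  cdRle (PySem.List.sorted2 (cdPositions s.toList) (fun p => p.1) (fun p => p.2))

-- 'dict(out)' rendered as the dict's items, flattened to triples
def cdDictItems (w : List ((Int × Int) × Int)) : List (Int × Int × Int) :=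
  (PySem.Dict.ofList w).items.map (fun q => (q.1.1, q.1.2, q.2))

-- the Python tuple comparison 'santa[i][0] < robo[j][0]'
def cdLtKey (a b : Int × Int) : Bool := a.1 < b.1 || (a.1 == b.1 && a.2 < b.2)

-- the two-pointer merge loop plus the two trailing extends
def cdMerge : List ((Int × Int) × Int) → List ((Int × Int) × Int) → List ((Int × Int) × Int)
  | [], v => v
  | u, [] => u
  | a :: u, b :: v =>
    if cdLtKey a.1 b.1 then a :: cdMerge u (b :: v)
    else if cdLtKey b.1 a.1 then b :: cdMerge (a :: u) v
    else b :: cdMerge u v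
termination_by u v => u.length + v.length
decreasing_by all_goals (simp; try omega)

def compute_deliveries_alt (directions : String) (is_part1 : Bool) : List (Int × Int × Int) :=
  match is_part1 with
  | true => cdDictItems (cdCounted directions)
  | false =>
    -- directions[0::2] / directions[1::2]; step 2 ≠ 0, so the slice never raises and getD "" is never taken
    let santa := cdCounted ((PySem.Str.slice? directions (some 0) none 2).getD "")
    let robo := cdCounted ((PySem.Str.slice? directions (some 1) none 2).getD "")
    cdDictItems (cdMerge santa robo)

-- ===== PRECONDITION & SPEC =====
def Spec_compute_deliveries (directions : String) (is_part1 : Bool) (out : List (Int × Int × Int)) : Prop := out = compute_deliveries_alt directions is_part1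
instance (directions : String) (is_part1 : Bool) (out : List (Int × Int × Int)) : Decidable (Spec_compute_deliveries directions is_part1 out) := by unfold Spec_compute_deliveries; infer_instance

-- ===== CLAIM (what is proved, stated in full; the proofs are below) =====
def Claim_equal_compute_deliveries : Prop := ∀ (directions : String) (is_part1 : Bool), Dom_compute_deliveries directions is_part1 → Spec_compute_deliveries directions is_part1 (compute_deliveries directions is_part1)

-- ===== LEMMAS AND PROOFS =====

-- the Python tuple order on (Int × Int) is the lexicographic one
def cdKey (k : Int × Int) : Lex (Int × Int) := toLex (k.1, k.2)
def cdPk (q : (Int × Int) × Int) : Lex (Int × Int) := cdKey q.1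
-- "strictly key-sorted" item lists
def cdSK (w : List ((Int × Int) × Int)) : Prop := w.Pairwise (fun p q => cdPk p < cdPk q)
def cdTripl (q : (Int × Int) × Int) : Int × Int × Int := (q.1.1, q.1.2, q.2)
-- pair-level form of A's sorted-items line
def cdPairItems (d : PySem.Dict (Int × Int) Int) : List ((Int × Int) × Int) :=
  (PySem.List.sorted d.keys cdKey).map (fun k => (k, d.getD k 0))

lemma cdKey_inj (p q : Int × Int) (h : cdKey p = cdKey q) : p = q := by
  simp only [cdKey] at h
  have h' := congrArg ofLex h
  simp only [ofLex_toLex] at h'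
  exact Prod.ext (congrArg Prod.fst h') (congrArg Prod.snd h')

-- sorted2 with the two projections IS sorted with the lexicographic key
lemma s2lex (xs : List (Int × Int)) :
    PySem.List.sorted2 xs (fun p => p.1) (fun p => p.2) = PySem.List.sorted xs cdKey := by
  show List.foldl _ [] xs = List.foldl _ [] xs
  congr 1
  funext acc x
  congr 1
  funext a b
  show (decide (a.1 < b.1) || !decide (b.1 < a.1) && decide (a.2 < b.2)) = decide (cdKey a < cdKey b)
  rcases lt_trichotomy a.1 b.1 with h | h | h <;>
    simp [cdKey, Prod.Lex.lt_iff, h, not_lt_of_gt] <;> omega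

lemma cdSK_nodup (w : List ((Int × Int) × Int)) (h : cdSK w) : w.Nodup :=
  List.Pairwise.imp (fun hlt he => absurd hlt (by simp [he])) h

lemma cdSK_keysNodup (w : List ((Int × Int) × Int)) (h : cdSK w) : (w.map (·.1)).Nodup := by
  show (w.map (·.1)).Pairwise (· ≠ ·)
  rw [List.pairwise_map]
  exact h.imp (fun hlt he => absurd hlt (by simp [cdPk, he]))

-- uniqueness of the strictly key-sorted arrangement
lemma cdEqSK (Z1 Z2 : List ((Int × Int) × Int)) (hp : Z1.Perm Z2) (h1 : cdSK Z1) (h2 : cdSK Z2) :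
    Z1 = Z2 := by
  unfold cdSK at h1 h2
  have e1 : PySem.List.sorted Z2 cdPk = Z1 :=
    PySem.List.sorted_eq_of_perm_of_pairwise_lt Z2 Z1 cdPk hp h1
  have e2 : PySem.List.sorted Z2 cdPk = Z2 :=
    PySem.List.sorted_eq_self_of_pairwise Z2 cdPk (h2.imp le_of_lt)
  rw [← e1, e2]

lemma cdPairItems_SK (d : PySem.Dict (Int × Int) Int) (hnd : d.keys.Nodup) :
    cdSK (cdPairItems d) := by
  unfold cdSK cdPairItems
  rw [List.pairwise_map]
  have hle := PySem.List.sorted_pairwise d.keys cdKey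
  have hnd' : (PySem.List.sorted d.keys cdKey).Nodup :=
    ((PySem.List.sorted_perm d.keys cdKey false).nodup_iff).mpr hnd
  exact (hle.and hnd').imp
    (fun hab => lt_of_le_of_ne hab.1 (fun he => hab.2 (cdKey_inj _ _ he)))

lemma cdPairItems_mem (d : PySem.Dict (Int × Int) Int) (q : (Int × Int) × Int) :
    q ∈ cdPairItems d ↔ q.1 ∈ d.keys ∧ q.2 = d.getD q.1 0 := by
  unfold cdPairItems
  simp only [List.mem_map]
  constructor
  · rintro ⟨k, hk, rfl⟩
    exact ⟨(PySem.List.mem_sorted d.keys cdKey false k).mp hk, rfl⟩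
  · rintro ⟨h1, h2⟩
    exact ⟨q.1, (PySem.List.mem_sorted d.keys cdKey false q.1).mpr h1,
      by obtain ⟨q1, q2⟩ := q; simp at h2 ⊢; exact h2.symm⟩

lemma cdItemsA_eq (d : PySem.Dict (Int × Int) Int) :
    cdSortedItemsA d = (cdPairItems d).map cdTripl := by
  unfold cdSortedItemsA cdPairItems cdTripl
  rw [s2lex, List.map_map]
  rfl

-- A's four sequential ifs compute exactly B's if/elif move
lemma cdStepA_eq (st : PySem.Dict (Int × Int) Int × Int × Int) (c : Char) :
    cdStepA st c = (st.1.modify (cdMove st.2 c) 0 (· + 1), cdMove st.2 c) := by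
  by_cases h1 : c = '>'
  · subst h1; simp [cdStepA, cdMove]
  · by_cases h2 : c = '<'
    · subst h2; simp [cdStepA, cdMove]
    · by_cases h3 : c = '^'
      · subst h3; simp [cdStepA, cdMove]
      · by_cases h4 : c = 'v'
        · subst h4; simp [cdStepA, cdMove]
        · simp [cdStepA, cdMove, h1, h2, h3, h4]

-- A's counting loop with (dict, pos) state = fold of the scanned position tail
lemma cd_fold_scan (cs : List Char) (d : PySem.Dict (Int × Int) Int) (p : Int × Int) :
    (cs.foldl (fun st c => (st.1.modify (cdMove st.2 c) 0 (· + 1), cdMove st.2 c)) (d, p)).1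
      = (List.scanl cdMove p cs).tail.foldl (fun dd q => dd.modify q 0 (· + 1)) d := by
  induction cs generalizing d p with
  | nil => simp [List.scanl]
  | cons c cs ih =>
    rw [List.foldl_cons, List.scanl]
    rw [ih]
    cases cs <;> simp [List.scanl]

-- B's append loop builds exactly the scan of cdMove
lemma cdPositions_eq (cs : List Char) : cdPositions cs = List.scanl cdMove (0, 0) cs := by
  suffices h : ∀ (cs : List Char) (acc : List (Int × Int)) (p : Int × Int),
      (cs.foldl (fun st c => (st.1 ++ [cdMove st.2 c], cdMove st.2 c)) (acc, p)).1
        = acc ++ (List.scanl cdMove p cs).tail by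
    unfold cdPositions
    rw [h cs [((0:Int), (0:Int))] ((0:Int), (0:Int))]
    cases cs <;> simp [List.scanl]
  intro cs
  induction cs with
  | nil => intro acc p; simp [List.scanl]
  | cons c cs ih =>
    intro acc p
    rw [List.foldl_cons, ih, List.scanl]
    cases cs <;> simp [List.scanl]

lemma cdRun_split (x : Int × Int) (t : List (Int × Int)) :
    t = List.replicate (cdRun x t).1 x ++ (cdRun x t).2 := by
  induction t with
  | nil => simp [cdRun]
  | cons y t ih =>
    by_cases h : y = x
    · subst h; simp only [cdRun, if_pos rfl]
      exact congrArg _ ih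
    · simp [cdRun, h]

lemma cdRun_head (x z : Int × Int) (t t' : List (Int × Int)) (h : (cdRun x t).2 = z :: t') :
    z ≠ x := by
  induction t with
  | nil => simp [cdRun] at h
  | cons y t ih =>
    by_cases hy : y = x
    · rw [show cdRun x (y :: t) = ((cdRun x t).1 + 1, (cdRun x t).2) by simp [cdRun, hy]] at h
      exact ih h
    · rw [show cdRun x (y :: t) = (0, y :: t) by simp [cdRun, hy]] at h
      obtain ⟨rfl, rfl⟩ : y = z ∧ t = t' := by simpa using h
      exact hy

-- run-length encoding of a ≤-sorted list: strictly key-sorted, and (k, c) ∈ it iff c counts k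
lemma cdRle_char (n : Nat) : ∀ L : List (Int × Int), L.length ≤ n →
    L.Pairwise (fun a b => cdKey a ≤ cdKey b) →
    cdSK (cdRle L) ∧ ∀ q : (Int × Int) × Int, q ∈ cdRle L ↔ q.1 ∈ L ∧ q.2 = (L.count q.1 : Int) := by
  induction n with
  | zero =>
    intro L hlen _
    obtain rfl : L = [] := List.length_eq_zero_iff.mp (Nat.le_zero.mp hlen)
    exact ⟨by simp [cdRle, cdSK], by simp [cdRle]⟩
  | succ n ih =>
    intro L hlen hpw
    match L with
    | [] => exact ⟨by simp [cdRle, cdSK], by simp [cdRle]⟩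
    | x :: t =>
      obtain ⟨hxle, hpw_t⟩ := List.pairwise_cons.mp hpw
      have hsplit := cdRun_split x t
      have hrest_sub : (cdRun x t).2.Sublist t := by
        conv_rhs => rw [hsplit]
        exact (List.suffix_append _ _).sublist
      have hpw_rest := List.Pairwise.sublist hrest_sub hpw_t
      have hrest_mem : ∀ y ∈ (cdRun x t).2, y ∈ t := fun y hy => hrest_sub.mem hy
      have hxlt : ∀ y ∈ (cdRun x t).2, cdKey x < cdKey y := by
        cases hr : (cdRun x t).2 with
        | nil => simp
        | cons z t' =>
          have hz : z ≠ x := cdRun_head x z t t' hr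
          have hzt : z ∈ t := hrest_mem z (by simp [hr])
          have hzlt : cdKey x < cdKey z :=
            lt_of_le_of_ne (hxle z hzt) (fun he => hz (cdKey_inj _ _ he).symm)
          intro y hy
          rcases List.mem_cons.mp hy with rfl | hy'
          · exact hzlt
          · have hple := List.pairwise_cons.mp (hr ▸ hpw_rest)
            exact lt_of_lt_of_le hzlt (hple.1 y hy')
      have hxnotin : x ∉ (cdRun x t).2 := fun hx => lt_irrefl _ (hxlt x hx)
      have hlen' : (cdRun x t).2.length ≤ n := by
        have h1 := cdRun_length x t
        simp only [List.length_cons] at hlen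
        omega
      obtain ⟨ihSK, ihmem⟩ := ih (cdRun x t).2 hlen' hpw_rest
      have hcount_x : (x :: t).count x = (cdRun x t).1 + 1 := by
        rw [List.count_cons_self]
        conv_lhs => rw [hsplit]
        rw [List.count_append, List.count_replicate, List.count_eq_zero.mpr hxnotin]
        simp
      have hcount_ne : ∀ k : Int × Int, k ≠ x → (x :: t).count k = (cdRun x t).2.count k := by
        intro k hk
        rw [List.count_cons_of_ne (Ne.symm hk)]  -- check direction
        conv_lhs => rw [hsplit]
        rw [List.count_append, List.count_replicate, if_neg (by simpa using Ne.symm hk)]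
        simp
      have hrle : cdRle (x :: t) = (x, ((cdRun x t).1 + 1 : Int)) :: cdRle (cdRun x t).2 := by
        rw [cdRle]
      constructor
      · rw [hrle]
        unfold cdSK at ihSK ⊢
        refine List.pairwise_cons.mpr ⟨?_, ihSK⟩
        intro q hq
        have hq1 : q.1 ∈ (cdRun x t).2 := ((ihmem q).mp hq).1
        exact hxlt q.1 hq1
      · intro q
        rw [hrle]
        simp only [List.mem_cons, ihmem]
        constructor
        · rintro (rfl | ⟨h1, h2⟩)
          · refine ⟨Or.inl rfl, ?_⟩
            rw [hcount_x]
            push_cast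
            ring
          · refine ⟨Or.inr (hrest_mem _ h1), ?_⟩
            rw [hcount_ne q.1 (fun he => hxnotin (he ▸ h1))]
            exact h2
        · rintro ⟨hmem, hc⟩
          by_cases hqx : q.1 = x
          · left
            obtain ⟨q1, q2⟩ := q
            simp only at hqx
            subst hqx
            rw [hcount_x] at hc
            simp only at hc
            rw [hc]
            push_cast
            ring_nf
          · right
            refine ⟨?_, by rw [hcount_ne q.1 hqx] at hc; exact hc⟩
            rcases hmem with he | hmt
            · exact absurd he hqx
            · rw [hsplit] at hmt
              rcases List.mem_append.mp hmt with hrep | hr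
              · exact absurd (List.eq_of_mem_replicate hrep) hqx
              · exact hr

-- B's _counted output is strictly key-sorted
lemma cdCounted_SK (s : String) : cdSK (cdCounted s) := by
  unfold cdCounted
  rw [s2lex]
  exact (cdRle_char _ _ le_rfl (PySem.List.sorted_pairwise _ cdKey)).1

-- 'dict(out)' on a nodup-keyed pair list is the list itself
lemma cdDictItems_eq (w : List ((Int × Int) × Int)) (hw : (w.map (·.1)).Nodup) :
    cdDictItems w = w.map cdTripl := by
  unfold cdDictItems
  have h := PySem.Dict.items_foldl_insert_fresh w (fun p => p.1) (fun p => p.2)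
    (PySem.Dict.empty : PySem.Dict (Int × Int) Int)
    (fun a _ => PySem.Dict.contains_empty a.1) hw
  have hofl : (PySem.Dict.ofList w).items = w := by
    show (List.foldl (fun acc p => acc.insert p.1 p.2) PySem.Dict.empty w).items = w
    rw [h]
    simp [PySem.Dict.empty]
  rw [hofl]
  rfl

-- get? after inserting a nodup-keyed pair list = first match in the list, else the old dict
lemma cd_get?_update (w : List ((Int × Int) × Int)) (d : PySem.Dict (Int × Int) Int)
    (k : Int × Int) (hw : (w.map (·.1)).Nodup) :
    (d.update w).get? k = ((w.find? (fun p => p.1 == k)).map (·.2)).or (d.get? k) := by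
  induction w generalizing d with
  | nil => simp [PySem.Dict.update]
  | cons p w ih =>
    simp only [List.map_cons, List.nodup_cons] at hw
    show ((d.insert p.1 p.2).update w).get? k = _
    rw [ih _ hw.2, List.find?_cons]
    by_cases h : p.1 = k
    · subst h
      simp only [beq_self_eq_true]
      have hn : w.find? (fun q => q.1 == p.1) = none := by
        rw [List.find?_eq_none]
        intro q hq
        simp only [beq_iff_eq]
        exact fun e => hw.1 (e ▸ List.mem_map_of_mem hq)
      rw [hn]
      simp [PySem.Dict.get?_insert_self]
    · have hb : (p.1 == k) = false := by simp [h]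
      rw [hb]
      cases hf : w.find? (fun q => q.1 == k) <;>
        simp [PySem.Dict.get?_insert_of_ne d p.2 (Ne.symm h)]

lemma cd_get?_ofList_append (u v : List ((Int × Int) × Int))
    (hu : (u.map (·.1)).Nodup) (hv : (v.map (·.1)).Nodup) (k : Int × Int) :
    (PySem.Dict.ofList (u ++ v)).get? k
      = ((v.find? (fun p => p.1 == k)).map (·.2)).or ((u.find? (fun p => p.1 == k)).map (·.2)) := by
  show (PySem.Dict.empty.update (u ++ v)).get? k = _
  have hsplit : PySem.Dict.empty.update (u ++ v) = (PySem.Dict.empty.update u).update v := by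
    simp [PySem.Dict.update, List.foldl_append]
  rw [hsplit, cd_get?_update v _ k hv, cd_get?_update u _ k hu, PySem.Dict.get?_empty]
  cases u.find? (fun p => p.1 == k) <;> cases v.find? (fun p => p.1 == k) <;> simp

lemma cd_mem_iff_find? (w : List ((Int × Int) × Int)) (hw : (w.map (·.1)).Nodup)
    (q : (Int × Int) × Int) : q ∈ w ↔ w.find? (fun p => p.1 == q.1) = some q := by
  constructor
  · intro h
    induction w with
    | nil => simp at h
    | cons p w ih =>
      simp only [List.map_cons, List.nodup_cons] at hw
      rw [List.find?_cons]
      rcases List.mem_cons.mp h with rfl | hmem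
      · simp
      · have hb : (p.1 == q.1) = false := by
          simp only [beq_eq_false_iff_ne, ne_eq]
          exact fun e => hw.1 (e ▸ List.mem_map_of_mem hmem)
        rw [hb]
        exact ih hw.2 hmem
  · exact fun h => List.mem_of_find?_eq_some h

lemma cd_find?_none_iff (w : List ((Int × Int) × Int)) (k : Int × Int) :
    w.find? (fun p => p.1 == k) = none ↔ k ∉ w.map (·.1) := by
  rw [List.find?_eq_none]
  constructor
  · intro h hk
    obtain ⟨p, hp, hpk⟩ := List.mem_map.mp hk
    exact h p hp (by simp [hpk])
  · intro h p hp
    simp only [beq_iff_eq]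
    exact fun e => h (e ▸ List.mem_map_of_mem hp)

-- the Bool tuple comparison is the lexicographic order
lemma cdLtKey_iff (a b : Int × Int) : cdLtKey a b = true ↔ cdKey a < cdKey b := by
  simp only [cdLtKey, cdKey, Prod.Lex.lt_iff, ofLex_toLex, Bool.or_eq_true, Bool.and_eq_true,
    decide_eq_true_eq, beq_iff_eq]

lemma cdKey_eq_of_not_lt (a b : Int × Int) (h1 : ¬ cdLtKey a b = true) (h2 : ¬ cdLtKey b a = true) :
    a = b := by
  rw [cdLtKey_iff] at h1 h2
  exact cdKey_inj a b (le_antisymm (not_lt.mp h2) (not_lt.mp h1))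

lemma cdMerge_nil_right (u : List ((Int × Int) × Int)) : cdMerge u [] = u := by
  cases u with
  | nil => rw [cdMerge]
  | cons a u => rw [cdMerge]; simp

lemma cdMerge_subset (u v : List ((Int × Int) × Int)) (q : (Int × Int) × Int)
    (h : q ∈ cdMerge u v) : q ∈ u ∨ q ∈ v := by
  induction u generalizing v with
  | nil => right; rwa [cdMerge] at h
  | cons a u ihu =>
    induction v with
    | nil => left; rwa [cdMerge_nil_right] at h
    | cons b v ihv =>
      rw [cdMerge] at h
      split_ifs at h with h1 h2
      · rcases List.mem_cons.mp h with rfl | h'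
        · exact Or.inl List.mem_cons_self
        · rcases ihu _ h' with hu' | hv'
          · exact Or.inl (List.mem_cons_of_mem a hu')
          · exact Or.inr hv'
      · rcases List.mem_cons.mp h with rfl | h'
        · exact Or.inr List.mem_cons_self
        · rcases ihv h' with hu' | hv'
          · exact Or.inl hu'
          · exact Or.inr (List.mem_cons_of_mem b hv')
      · rcases List.mem_cons.mp h with rfl | h'
        · exact Or.inr List.mem_cons_self
        · rcases ihu _ h' with hu' | hv'
          · exact Or.inl (List.mem_cons_of_mem a hu')
          · exact Or.inr (List.mem_cons_of_mem b hv')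

lemma cdMerge_SK (u v : List ((Int × Int) × Int)) (hu : cdSK u) (hv : cdSK v) :
    cdSK (cdMerge u v) := by
  induction u generalizing v with
  | nil => rwa [cdMerge]
  | cons a u ihu =>
    induction v with
    | nil => rwa [cdMerge_nil_right]
    | cons b v ihv =>
      obtain ⟨hau, hu'⟩ := List.pairwise_cons.mp hu
      obtain ⟨hbv, hv'⟩ := List.pairwise_cons.mp hv
      rw [cdMerge]
      split_ifs with h1 h2
      · have hab : cdKey a.1 < cdKey b.1 := (cdLtKey_iff _ _).mp h1
        refine List.pairwise_cons.mpr ⟨?_, ihu _ hu' hv⟩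
        intro q hq
        rcases cdMerge_subset _ _ _ hq with hq' | hq'
        · exact hau q hq'
        · rcases List.mem_cons.mp hq' with rfl | hq''
          · exact hab
          · exact lt_trans hab (hbv q hq'')
      · have hba : cdKey b.1 < cdKey a.1 := (cdLtKey_iff _ _).mp h2
        refine List.pairwise_cons.mpr ⟨?_, ihv hv'⟩
        intro q hq
        rcases cdMerge_subset _ _ _ hq with hq' | hq'
        · rcases List.mem_cons.mp hq' with rfl | hq''
          · exact hba
          · exact lt_trans hba (hau q hq'')
        · exact hbv q hq'
      · have hab : a.1 = b.1 := cdKey_eq_of_not_lt _ _ h1 h2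
        refine List.pairwise_cons.mpr ⟨?_, ihu _ hu' hv'⟩
        intro q hq
        rcases cdMerge_subset _ _ _ hq with hq' | hq'
        · have h5 : cdKey a.1 < cdKey q.1 := hau q hq'
          show cdKey b.1 < cdKey q.1
          rwa [hab] at h5
        · exact hbv q hq'

lemma cdMerge_mem (u v : List ((Int × Int) × Int)) (hu : cdSK u) (hv : cdSK v)
    (q : (Int × Int) × Int) :
    q ∈ cdMerge u v ↔ q ∈ v ∨ (q ∈ u ∧ q.1 ∉ v.map (·.1)) := by
  induction u generalizing v with
  | nil => rw [cdMerge]; simp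
  | cons a u ihu =>
    induction v with
    | nil => rw [cdMerge_nil_right]; simp
    | cons b v ihv =>
      obtain ⟨hau, hu'⟩ := List.pairwise_cons.mp hu
      obtain ⟨hbv, hv'⟩ := List.pairwise_cons.mp hv
      rw [cdMerge]
      split_ifs with h1 h2
      · -- key a < key b ≤ every key of v : a is not in b::v, nor is its key
        have hab : cdKey a.1 < cdKey b.1 := (cdLtKey_iff _ _).mp h1
        have hanotk : ¬(a.1 = b.1 ∨ a.1 ∈ v.map (·.1)) := by
          rintro (he | hm)
          · exact lt_irrefl _ (he ▸ hab)
          · obtain ⟨p, hp, he⟩ := List.mem_map.mp hm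
            have h6 : cdKey b.1 < cdKey p.1 := hbv p hp
            exact lt_irrefl _ (lt_trans hab (he ▸ h6))
        simp only [List.mem_cons, ihu _ hu' hv, List.map_cons]
        constructor
        · rintro (rfl | h)
          · exact Or.inr ⟨Or.inl rfl, hanotk⟩
          · rcases h with h | ⟨h3, h4⟩
            · exact Or.inl h
            · exact Or.inr ⟨Or.inr h3, h4⟩
        · rintro (h | ⟨h3, h4⟩)
          · exact Or.inr (Or.inl h)
          · rcases h3 with rfl | h3
            · exact Or.inl rfl
            · exact Or.inr (Or.inr ⟨h3, h4⟩)
      · -- key b < key a ≤ every key of a::u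
        have hba : cdKey b.1 < cdKey a.1 := (cdLtKey_iff _ _).mp h2
        have haukey : ∀ p ∈ a :: u, cdKey b.1 < cdKey p.1 := by
          intro p hp
          rcases List.mem_cons.mp hp with rfl | hp'
          · exact hba
          · exact lt_trans hba (hau p hp')
        simp only [List.mem_cons, ihv hv', List.map_cons]
        constructor
        · rintro (rfl | h)
          · exact Or.inl (Or.inl rfl)
          · rcases h with h | ⟨h3, h4⟩
            · exact Or.inl (Or.inr h)
            · refine Or.inr ⟨h3, ?_⟩
              rintro (he | hm)
              · rcases h3 with rfl | h3
                · exact lt_irrefl _ (he ▸ hba)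
                · exact lt_irrefl _ (he ▸ haukey q (List.mem_cons_of_mem a h3))
              · exact h4 hm
        · rintro (h | ⟨h3, h4⟩)
          · rcases h with rfl | h
            · exact Or.inl rfl
            · exact Or.inr (Or.inl h)
          · exact Or.inr (Or.inr ⟨h3, fun hm => h4 (Or.inr hm)⟩)
      · -- equal keys: b wins, a is dropped
        have hab : a.1 = b.1 := cdKey_eq_of_not_lt _ _ h1 h2
        simp only [List.mem_cons, ihu _ hu' hv', List.map_cons]
        constructor
        · rintro (rfl | h)
          · exact Or.inl (Or.inl rfl)
          · rcases h with h | ⟨h3, h4⟩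
            · exact Or.inl (Or.inr h)
            · refine Or.inr ⟨Or.inr h3, ?_⟩
              rintro (he | hm)
              · have h5 : cdKey a.1 < cdKey q.1 := hau q h3
                rw [hab, he] at h5
                exact lt_irrefl _ h5
              · exact h4 hm
        · rintro (h | ⟨h3, h4⟩)
          · rcases h with rfl | h
            · exact Or.inl rfl
            · exact Or.inr (Or.inl h)
          · rcases h3 with rfl | h3
            · exact absurd (Or.inl hab) h4
            · exact Or.inr (Or.inr ⟨h3, fun hm => h4 (Or.inr hm)⟩)

-- the merged list IS A's sorted items of the splatted dict
lemma cdMerge_eq (u v : List ((Int × Int) × Int)) (hu : cdSK u) (hv : cdSK v) :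
    cdMerge u v = cdPairItems (PySem.Dict.ofList (u ++ v)) := by
  have hku := cdSK_keysNodup u hu
  have hkv := cdSK_keysNodup v hv
  have hndD := PySem.Dict.nodup_keys_ofList (u ++ v)
  apply cdEqSK _ _ _ (cdMerge_SK u v hu hv) (cdPairItems_SK _ hndD)
  rw [List.perm_ext_iff_of_nodup (cdSK_nodup _ (cdMerge_SK u v hu hv))
    (cdSK_nodup _ (cdPairItems_SK _ hndD))]
  intro q
  rw [cdMerge_mem u v hu hv q, cdPairItems_mem]
  have hget := cd_get?_ofList_append u v hku hkv q.1
  have hmemiff : (q.1 ∈ (PySem.Dict.ofList (u ++ v)).keys ∧ q.2 = (PySem.Dict.ofList (u ++ v)).getD q.1 0)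
      ↔ (PySem.Dict.ofList (u ++ v)).get? q.1 = some q.2 := by
    constructor
    · rintro ⟨h1, h2⟩
      cases hg : (PySem.Dict.ofList (u ++ v)).get? q.1 with
      | none => exact absurd ((PySem.Dict.get?_eq_none_iff_not_mem_keys _ _).mp hg) (by simp [h1])
      | some c =>
        rw [PySem.Dict.getD_eq_get?_getD, hg] at h2
        simp at h2
        rw [h2]
    · intro hg
      refine ⟨?_, by rw [PySem.Dict.getD_eq_get?_getD, hg]; rfl⟩
      by_contra hmem
      rw [← PySem.Dict.get?_eq_none_iff_not_mem_keys] at hmem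
      rw [hmem] at hg
      simp at hg
  rw [hmemiff, hget]
  cases hfv : v.find? (fun p => p.1 == q.1) with
  | some p =>
    have hp1 : p.1 = q.1 := by simpa using List.find?_some hfv
    simp only [Option.map_some, Option.some_or]
    constructor
    · rintro (hqv | ⟨_, hqk⟩)
      · rw [(cd_mem_iff_find? v hkv q).mp hqv] at hfv
        obtain rfl := Option.some.inj hfv
        simp
      · exact absurd (hp1 ▸ List.mem_map_of_mem (List.mem_of_find?_eq_some hfv)) hqk
    · intro h
      have h2 : p.2 = q.2 := by simpa using h
      left
      have : p = q := Prod.ext hp1 h2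
      exact this ▸ List.mem_of_find?_eq_some hfv
  | none =>
    have hknv : q.1 ∉ v.map (·.1) := (cd_find?_none_iff v q.1).mp hfv
    have hqnv : q ∉ v := fun h => hknv (List.mem_map_of_mem h)
    simp only [Option.map_none, Option.none_or]
    cases hfu : u.find? (fun p => p.1 == q.1) with
    | some p =>
      have hp1 : p.1 = q.1 := by simpa using List.find?_some hfu
      constructor
      · rintro (hqv | ⟨hqu, _⟩)
        · exact absurd hqv hqnv
        · rw [(cd_mem_iff_find? u hku q).mp hqu] at hfu
          obtain rfl := Option.some.inj hfu
          simp
      · intro h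
        have h2 : p.2 = q.2 := by simpa using h
        have : p = q := Prod.ext hp1 h2
        exact Or.inr ⟨this ▸ List.mem_of_find?_eq_some hfu, hknv⟩
    | none =>
      have hknu : q.1 ∉ u.map (·.1) := (cd_find?_none_iff u q.1).mp hfu
      simp only [Option.map_none]
      constructor
      · rintro (hqv | ⟨hqu, _⟩)
        · exact absurd hqv hqnv
        · exact absurd (List.mem_map_of_mem hqu) hknu
      · intro h
        simp at h

-- part 1: A's incremental dict equals B's sort-and-run-length pipeline
lemma cd_part1 (s : String) : compute_deliveries s true = compute_deliveries_alt s true := by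
  rw [compute_deliveries, compute_deliveries_alt]
  have hfun : cdStepA = fun st c => (st.1.modify (cdMove st.2 c) 0 (· + 1), cdMove st.2 c) := by
    funext st c; exact cdStepA_eq st c
  rw [hfun, cd_fold_scan]
  have hd : (List.scanl cdMove ((0:Int), (0:Int)) s.toList).tail.foldl
        (fun dd q => dd.modify q 0 (· + 1))
        ((PySem.Dict.empty : PySem.Dict (Int × Int) Int).modify (0, 0) 0 (· + 1))
      = PySem.Dict.counter (List.scanl cdMove ((0:Int), (0:Int)) s.toList) := by
    rw [PySem.Dict.counter_eq_foldl]
    cases s.toList <;> simp [List.scanl]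
  rw [hd]
  unfold cdCounted
  rw [cdPositions_eq, s2lex]
  set P := List.scanl cdMove ((0:Int), (0:Int)) s.toList with hP
  obtain ⟨hSK, hmem⟩ := cdRle_char (PySem.List.sorted P cdKey).length _ le_rfl
    (PySem.List.sorted_pairwise P cdKey)
  rw [cdItemsA_eq, cdDictItems_eq _ (cdSK_keysNodup _ hSK)]
  congr 1
  apply cdEqSK _ _ _ (cdPairItems_SK _ (PySem.Dict.nodup_keys_counter P)) hSK
  rw [List.perm_ext_iff_of_nodup (cdSK_nodup _ (cdPairItems_SK _ (PySem.Dict.nodup_keys_counter P)))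
    (cdSK_nodup _ hSK)]
  intro q
  rw [cdPairItems_mem, hmem q, PySem.Dict.keys_counter, PySem.Dict.getD_counter]
  rw [PySem.List.mem_sorted P cdKey false q.1, PySem.Set.mem_ofList]
  rw [((PySem.List.sorted_perm P cdKey false).count_eq q.1)]

-- ===== the part-2 string split: A's enumerate-filter joins are B's [0::2] / [1::2] slices =====
-- even-index characters, two at a time
def cdEvens : List Char → List Char
  | [] => []
  | [a] => [a]
  | a :: _ :: t => a :: cdEvens t

lemma cdEvens_cons (c : Char) (cs : List Char) : cdEvens (c :: cs) = c :: cdEvens cs.tail := by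
  cases cs <;> rfl

lemma cd_mod_two (s : Int) : (PySem.Int.mod s 2 = 0 → PySem.Int.mod (s + 1) 2 = 1) ∧
    (PySem.Int.mod s 2 = 1 → PySem.Int.mod (s + 1) 2 = 0) := by
  simp only [PySem.Int.mod_eq_emod_of_pos (show (0:Int) < 2 by norm_num)]
  omega

lemma cd_enum_filter_even (cs : List Char) (s : Int) :
    ((PySem.List.enumerate cs s).filter (fun p => PySem.Int.mod p.1 2 == 0)).map (·.2)
      = (if PySem.Int.mod s 2 == 0 then cdEvens cs else cdEvens cs.tail) := by
  induction cs generalizing s with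
  | nil => simp [PySem.List.enumerate, cdEvens]
  | cons c cs ih =>
    rw [PySem.List.enumerate_cons, List.filter_cons]
    rcases PySem.Int.mod_two_eq s with h | h
    · rw [if_pos (by (simp only [h]; decide) : (PySem.Int.mod s 2 == 0) = true),
        if_pos (by (simp only [h]; decide) : (PySem.Int.mod s 2 == 0) = true), List.map_cons, ih,
        if_neg (by (simp only [(cd_mod_two s).1 h]; decide) : ¬ ((PySem.Int.mod (s + 1) 2 == 0) = true)),
        cdEvens_cons]
    · rw [if_neg (by (simp only [h]; decide) : ¬ ((PySem.Int.mod s 2 == 0) = true)),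
        if_neg (by (simp only [h]; decide) : ¬ ((PySem.Int.mod s 2 == 0) = true))]
      simp only [List.tail_cons]
      rw [ih, if_pos (by (simp only [(cd_mod_two s).2 h]; decide) : (PySem.Int.mod (s + 1) 2 == 0) = true)]

lemma cd_enum_filter_odd (cs : List Char) (s : Int) :
    ((PySem.List.enumerate cs s).filter (fun p => PySem.Int.mod p.1 2 == 1)).map (·.2)
      = (if PySem.Int.mod s 2 == 1 then cdEvens cs else cdEvens cs.tail) := by
  induction cs generalizing s with
  | nil => simp [PySem.List.enumerate, cdEvens]
  | cons c cs ih =>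
    rw [PySem.List.enumerate_cons, List.filter_cons]
    rcases PySem.Int.mod_two_eq s with h | h
    · rw [if_neg (by (simp only [h]; decide) : ¬ ((PySem.Int.mod s 2 == 1) = true)),
        if_neg (by (simp only [h]; decide) : ¬ ((PySem.Int.mod s 2 == 1) = true))]
      simp only [List.tail_cons]
      rw [ih, if_pos (by (simp only [(cd_mod_two s).1 h]; decide) : (PySem.Int.mod (s + 1) 2 == 1) = true)]
    · rw [if_pos (by (simp only [h]; decide) : (PySem.Int.mod s 2 == 1) = true),
        if_pos (by (simp only [h]; decide) : (PySem.Int.mod s 2 == 1) = true), List.map_cons, ih,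
        if_neg (by (simp only [(cd_mod_two s).2 h]; decide) : ¬ ((PySem.Int.mod (s + 1) 2 == 1) = true)),
        cdEvens_cons]

-- slice machinery: xs[0::2] / xs[1::2] pick the even / odd indices
lemma cd_fm_even (cs : List Char) :
    List.filterMap (fun k : Nat => cs[2 * k]?) (List.range ((cs.length + 1) / 2)) = cdEvens cs := by
  induction cs using cdEvens.induct with
  | case1 => rfl
  | case2 a => simp [List.range_one, cdEvens]
  | case3 a b t ih =>
    have hlen : ((a :: b :: t).length + 1) / 2 = (t.length + 1) / 2 + 1 := by
      simp [List.length_cons]; omega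
    rw [hlen, List.range_succ_eq_map, List.filterMap_cons, List.filterMap_map]
    simp only [Nat.mul_zero, List.getElem?_cons_zero]
    rw [show cdEvens (a :: b :: t) = a :: cdEvens t from rfl]
    rw [← ih]
    congr 1

lemma cd_slice_even (cs : List Char) : PySem.List.slice? cs (some 0) none 2 = some (cdEvens cs) := by
  rw [PySem.List.slice?, PySem.List.sliceIndices]
  norm_num
  rcases Nat.eq_zero_or_pos cs.length with h0 | h0
  · rw [List.length_eq_zero_iff] at h0; subst h0; rfl
  · rw [if_pos (by exact_mod_cast h0)]
    have hc : ((↑cs.length + 2 - 1 : Int) / 2).toNat = (cs.length + 1) / 2 := by omega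
    rw [hc, ← cd_fm_even cs]
    apply List.filterMap_congr
    intro k _
    rw [show ((2 * (k : Int)).toNat) = 2 * k by omega]

lemma cd_slice_odd (cs : List Char) : PySem.List.slice? cs (some 1) none 2 = some (cdEvens cs.tail) := by
  rw [PySem.List.slice?, PySem.List.sliceIndices]
  norm_num
  cases cs with
  | nil => rfl
  | cons a t =>
    rw [show min (1 : Int) (↑(a :: t).length) = 1 by simp only [List.length_cons]; push_cast; omega]
    rcases Nat.eq_zero_or_pos t.length with h0 | h0
    · have ht : t = [] := List.length_eq_zero_iff.mp h0
      subst ht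
      simp [cdEvens]
    · rw [if_pos (show 1 < (a :: t).length by simp only [List.length_cons]; omega)]
      have hc : ((↑(a :: t).length - 1 + 2 - 1 : Int) / 2).toNat = (t.length + 1) / 2 := by
        simp [List.length_cons]; omega
      rw [List.tail_cons, hc, ← cd_fm_even t]
      apply List.filterMap_congr
      intro k _
      rw [show ((1 + 2 * (k : Int)).toNat) = 2 * k + 1 by omega]
      simp

-- A's enumerate-filter joins produce exactly B's slices
lemma cd_santa_eq (s : String) :
    String.ofList (((PySem.List.enumerate s.toList 0).filter
        (fun p => PySem.Int.mod p.1 2 == 0)).map (·.2))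
      = (PySem.Str.slice? s (some 0) none 2).getD "" := by
  rw [PySem.Str.slice?]
  show _ = (Option.map String.ofList (PySem.List.slice? s.toList (some 0) none 2)).getD ""
  rw [cd_slice_even, cd_enum_filter_even]
  norm_num [PySem.Int.mod]

lemma cd_robo_eq (s : String) :
    String.ofList (((PySem.List.enumerate s.toList 0).filter
        (fun p => PySem.Int.mod p.1 2 == 1)).map (·.2))
      = (PySem.Str.slice? s (some 1) none 2).getD "" := by
  rw [PySem.Str.slice?]
  show _ = (Option.map String.ofList (PySem.List.slice? s.toList (some 1) none 2)).getD ""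
  rw [cd_slice_odd, cd_enum_filter_odd]
  norm_num [PySem.Int.mod]

-- packing the returned triples back into dict pairs is the identity on B's pair lists
lemma cd_pack_tripl (w : List ((Int × Int) × Int)) :
    (w.map cdTripl).map (fun t : Int × Int × Int => ((t.1, t.2.1), t.2.2)) = w := by
  rw [List.map_map]
  have : ((fun t : Int × Int × Int => ((t.1, t.2.1), t.2.2)) ∘ cdTripl) = id := by
    funext q
    obtain ⟨⟨q11, q12⟩, q2⟩ := q
    rfl
  rw [this, List.map_id]

-- ===== VERDICT (by name: the statement is the Claim_ definition above) =====
theorem compute_deliveries_spec : Claim_equal_compute_deliveries := by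
  intro directions is_part1 _
  unfold Spec_compute_deliveries
  cases is_part1 with
  | true => exact cd_part1 directions
  | false =>
    rw [compute_deliveries, compute_deliveries_alt]
    rw [cd_santa_eq, cd_robo_eq, cd_part1, cd_part1]
    rw [compute_deliveries_alt, compute_deliveries_alt]
    set su := (PySem.Str.slice? directions (some 0) none 2).getD ""
    set sv := (PySem.Str.slice? directions (some 1) none 2).getD ""
    have hu := cdCounted_SK su
    have hv := cdCounted_SK sv
    rw [cdDictItems_eq _ (cdSK_keysNodup _ hu), cdDictItems_eq _ (cdSK_keysNodup _ hv)]
    rw [show ((cdCounted su).map cdTripl ++ (cdCounted sv).map cdTripl).map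
          (fun t : Int × Int × Int => ((t.1, t.2.1), t.2.2))
        = cdCounted su ++ cdCounted sv by
      rw [List.map_append, cd_pack_tripl, cd_pack_tripl]]
    rw [cdItemsA_eq, ← cdMerge_eq _ _ hu hv]
    rw [cdDictItems_eq _ (cdSK_keysNodup _ (cdMerge_SK _ _ hu hv))]
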